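-- pv_equiv track=rewrite | github.com/ryandeathridge/Agent1 | modal-api/pipeline.py | _build_keyword_index
-- ===== SOURCE A (Python) =====
-- from typing import Any, Dict, List, Optional, Tuple
--
-- def _build_keyword_index(taxonomy: Dict[str, Any]) -> List[Tuple[str, str, str, str]]:
--     """Return [(keyword_lower, l1, l2, l3), ...] sorted longest-first."""
--     entries = []
--     for l1, l2_dict in taxonomy.items():
--         if not isinstance(l2_dict, dict):
--             continue
--         for l2, l3_list in l2_dict.items():
--             if isinstance(l3_list, list):
--                 for l3 in l3_list:
--                     for kw in _keywords_from(l3):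
--                         entries.append((kw.lower(), l1, l2, l3))
--             for kw in _keywords_from(l2):
--                 entries.append((kw.lower(), l1, l2, ""))
--         for kw in _keywords_from(l1):
--             entries.append((kw.lower(), l1, "", ""))
--     entries.sort(key=lambda x: -len(x[0]))
--     return entries
--
-- def _keywords_from(text: str) -> List[str]:
--     parts = [text]
--     for sep in [",", "&", "/", "(", ")"]:
--         new_parts = []
--         for p in parts:
--             new_parts.extend(p.split(sep))
--         parts = new_parts
--     return [p.strip() for p in parts if len(p.strip()) > 2]
-- ===== SOURCE B (Python) =====
-- # B: single-pass character scan replaces the iterated split cascade, and a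
-- # length-bucket dict + descending key walk replaces the stable sort.
-- _SEPS = {",", "&", "/", "(", ")"}
--
-- def _keywords_from(text):
--     tokens = []
--     cur = []
--     for ch in text:
--         if ch in _SEPS:
--             tokens.append("".join(cur))
--             cur = []
--         else:
--             cur.append(ch)
--     tokens.append("".join(cur))
--     out = []
--     for tok in tokens:
--         t = tok.strip()
--         if len(t) > 2:
--             out.append(t)
--     return out
--
-- def _build_keyword_index(taxonomy):
--     entries = []
--     for l1, l2_dict in taxonomy.items():
--         if not isinstance(l2_dict, dict):
--             continue
--         for l2, l3_list in l2_dict.items():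
--             if isinstance(l3_list, list):
--                 for l3 in l3_list:
--                     entries.extend((kw.lower(), l1, l2, l3) for kw in _keywords_from(l3))
--             entries.extend((kw.lower(), l1, l2, "") for kw in _keywords_from(l2))
--         entries.extend((kw.lower(), l1, "", "") for kw in _keywords_from(l1))
--     buckets = {}
--     for e in entries:
--         buckets.setdefault(len(e[0]), []).append(e)
--     out = []
--     for L in sorted(buckets, reverse=True):
--         out.extend(buckets[L])
--     return out
-- ===== Notes on version B (the rewrite author's own statement) =====
-- stated objective: alternative
-- what changed: B replaces the five-pass split cascade in _keywords_from by a single-pass character scan over a separator set, and replaces the stable sort by -len with a length-bucket dict emitted by walking the bucket keys in descending order.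
import Mathlib
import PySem

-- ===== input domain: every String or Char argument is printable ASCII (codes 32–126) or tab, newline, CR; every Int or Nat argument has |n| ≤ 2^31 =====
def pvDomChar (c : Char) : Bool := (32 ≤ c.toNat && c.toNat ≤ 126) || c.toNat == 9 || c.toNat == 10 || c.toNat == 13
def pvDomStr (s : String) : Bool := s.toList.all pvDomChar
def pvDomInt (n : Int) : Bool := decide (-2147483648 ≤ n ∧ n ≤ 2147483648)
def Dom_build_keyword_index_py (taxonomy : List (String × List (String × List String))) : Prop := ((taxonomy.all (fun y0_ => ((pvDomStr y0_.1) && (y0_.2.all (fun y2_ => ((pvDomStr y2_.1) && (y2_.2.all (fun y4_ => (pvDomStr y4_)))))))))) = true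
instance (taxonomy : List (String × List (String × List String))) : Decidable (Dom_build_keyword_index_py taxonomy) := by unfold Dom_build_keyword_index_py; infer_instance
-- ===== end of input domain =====

-- B replaces the iterated split cascade by a single-pass scan and the stable sort by
-- length buckets walked in descending key order; same return value (objective: alternative).

-- ===== PORT A =====
-- _keywords_from: parts = [text]; repeated split by each separator; strip + keep len > 2
def pvKeywordsA (text : String) : List String :=
  let parts := [text.toList]
  let parts := ([',', '&', '/', '(', ')'] : List Char).foldl
    (fun parts sep => parts.foldl (fun np p => np ++ PySem.Chars.splitOn p [sep]) []) parts
  parts.filterMap (fun p =>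
    if 2 < (PySem.Chars.strip p).length then some (String.ofList (PySem.Chars.strip p)) else none)

def build_keyword_index_py (taxonomy : List (String × List (String × List String))) : List (String × String × String × String) :=
  let entries := taxonomy.foldl (fun acc x =>
    let acc := x.2.foldl (fun acc y =>
      let acc := y.2.foldl (fun acc l3 =>
        (pvKeywordsA l3).foldl (fun acc kw => acc ++ [(PySem.Str.lower kw, x.1, y.1, l3)]) acc) acc
      (pvKeywordsA y.1).foldl (fun acc kw => acc ++ [(PySem.Str.lower kw, x.1, y.1, "")]) acc) acc
    (pvKeywordsA x.1).foldl (fun acc kw => acc ++ [(PySem.Str.lower kw, x.1, "", "")]) acc) []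
  PySem.List.sorted entries (fun e => -(PySem.Str.len e.1)) false

-- ===== PORT B =====
def pvSeps : List Char := [',', '&', '/', '(', ')']

-- B's single-pass scanner: cur is the token being built, flushed at each separator
def pvScan (cs : List Char) (cur : List Char) : List (List Char) :=
  match cs with
  | [] => [cur]
  | c :: rest => if pvSeps.contains c then cur :: pvScan rest [] else pvScan rest (cur ++ [c])

def pvKeywordsB (text : String) : List String :=
  (pvScan text.toList []).foldl (fun out tok =>
    if 2 < (PySem.Chars.strip tok).length then out ++ [String.ofList (PySem.Chars.strip tok)] else out) []

def build_keyword_index_py_alt (taxonomy : List (String × List (String × List String))) : List (String × String × String × String) :=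
  let entries := taxonomy.foldl (fun acc x =>
    let acc := x.2.foldl (fun acc y =>
      let acc := y.2.foldl (fun acc l3 =>
        acc ++ (pvKeywordsB l3).map (fun kw => (PySem.Str.lower kw, x.1, y.1, l3))) acc
      acc ++ (pvKeywordsB y.1).map (fun kw => (PySem.Str.lower kw, x.1, y.1, ""))) acc
    acc ++ (pvKeywordsB x.1).map (fun kw => (PySem.Str.lower kw, x.1, "", ""))) []
  let buckets := entries.foldl (fun d e => d.modify (PySem.Str.len e.1) ([] : List (String × String × String × String)) (· ++ [e])) PySem.Dict.empty
  (PySem.List.sorted buckets.keys (fun L => L) true).foldl (fun out L => out ++ buckets.getD L []) []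

-- ===== PRECONDITION & SPEC =====
def Spec_build_keyword_index_py (taxonomy : List (String × List (String × List String))) (out : List (String × String × String × String)) : Prop := out = build_keyword_index_py_alt taxonomy
instance (taxonomy : List (String × List (String × List String))) (out : List (String × String × String × String)) : Decidable (Spec_build_keyword_index_py taxonomy out) := by unfold Spec_build_keyword_index_py; infer_instance

-- ===== CLAIM (what is proved, stated in full; the proofs are below) =====
def Claim_equal_build_keyword_index_py : Prop := ∀ (taxonomy : List (String × List (String × List String))), Dom_build_keyword_index_py taxonomy → Spec_build_keyword_index_py taxonomy (build_keyword_index_py taxonomy)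

-- ===== LEMMAS AND PROOFS =====


-- proof helper: pvScan with the separator test abstracted to a predicate
def pvScanP (p : Char → Bool) : List Char → List Char → List (List Char)
  | [], cur => [cur]
  | c :: rest, cur => if p c then cur :: pvScanP p rest [] else pvScanP p rest (cur ++ [c])

theorem pvScan_eq_scanP (cs cur : List Char) : pvScan cs cur = pvScanP (fun c => pvSeps.contains c) cs cur := by
  induction cs generalizing cur with
  | nil => rfl
  | cons c rest ih => simp only [pvScan, pvScanP]; split <;> simp [ih]

theorem pvScanP_ne_nil (p : Char → Bool) (cs cur : List Char) : pvScanP p cs cur ≠ [] := by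
  induction cs generalizing cur with
  | nil => simp [pvScanP]
  | cons c rest ih => simp only [pvScanP]; split <;> simp [ih]

theorem pvScanP_nosep (p : Char → Bool) (cs cur : List Char) (h : ∀ c ∈ cs, p c = false) :
    pvScanP p cs cur = [cur ++ cs] := by
  induction cs generalizing cur with
  | nil => simp [pvScanP]
  | cons c rest ih =>
    simp only [pvScanP, h c (by simp)]
    simp [ih _ (fun x hx => h x (by simp [hx]))]

theorem pvScanP_append_sep (p : Char → Bool) (d : Char) (hd : p d = true) (xs ys cur : List Char) :
    pvScanP p (xs ++ d :: ys) cur = pvScanP p xs cur ++ pvScanP p ys [] := by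
  induction xs generalizing cur with
  | nil => simp [pvScanP, hd]
  | cons c rest ih => simp only [List.cons_append, pvScanP]; split <;> simp [ih]

theorem pvScanP_snoc_nonsep (p : Char → Bool) (c : Char) (hc : p c = false) (xs cur : List Char) :
    pvScanP p (xs ++ [c]) cur = (pvScanP p xs cur).dropLast ++ [(pvScanP p xs cur).getLastD [] ++ [c]] := by
  induction xs generalizing cur with
  | nil => simp [pvScanP, hc]
  | cons x rest ih =>
    simp only [List.cons_append, pvScanP]
    split
    · have hne := pvScanP_ne_nil p rest []
      cases hr : pvScanP p rest [] with
      | nil => exact absurd hr hne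
      | cons a as => simp [ih, hr]
    · simp [ih]

theorem pvSplitOn_go_single (d : Char) (l : List Char) : ∀ (fuel : Nat) (cur : List Char) (acc : List (List Char)),
    l.length ≤ fuel →
    PySem.Chars.splitOn.go [d] fuel l cur acc = acc.reverse ++ pvScanP (fun c => c == d) l cur.reverse := by
  induction l with
  | nil =>
    intro fuel cur acc _
    cases fuel <;> simp [PySem.Chars.splitOn.go, pvScanP]
  | cons c rest ih =>
    intro fuel cur acc hf
    cases fuel with
    | zero => simp at hf
    | succ n =>
      simp only [PySem.Chars.splitOn.go]
      by_cases hc : c = d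
      · subst hc
        have hpre : List.isPrefixOf [c] (c :: rest) = true := by simp [List.isPrefixOf]
        simp only [hpre, if_true, List.length_cons, List.length_nil, Nat.zero_add, List.drop_one, List.tail_cons]
        rw [ih n [] (cur.reverse :: acc) (by simpa using Nat.le_of_succ_le_succ hf)]
        simp [pvScanP]
      · have hpre : List.isPrefixOf [d] (c :: rest) = false := by
          simp [List.isPrefixOf]; exact fun h => absurd h.symm hc
        simp only [hpre, Bool.false_eq_true, if_false]
        rw [ih n (c :: cur) acc (by simpa using Nat.le_of_succ_le_succ hf)]
        simp [pvScanP, hc]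

theorem pvSplitOn_single (d : Char) (l : List Char) :
    PySem.Chars.splitOn l [d] = pvScanP (fun c => c == d) l [] := by
  unfold PySem.Chars.splitOn
  simpa using pvSplitOn_go_single d l (l.length + 1) [] [] (by omega)


theorem pvDropLast_getLastD {α : Type} (l : List α) (d : α) (h : l ≠ []) :
    l.dropLast ++ [l.getLast?.getD d] = l := by
  induction l with
  | nil => exact absurd rfl h
  | cons a as ih =>
    cases as with
    | nil => simp
    | cons b bs => simpa using ih (by simp)

theorem pvDropLast_getLastD_append {α : Type} (l : List α) (d : α) (X : List α) (h : l ≠ []) :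
    l.dropLast ++ (l.getLast?.getD d) :: X = l ++ X := by
  conv_rhs => rw [← pvDropLast_getLastD l d h]
  simp

theorem pvScanP_merge (p q : Char → Bool) (cs : List Char) : ∀ (cur : List Char),
    (pvScanP p cs cur).flatMap (fun t => pvScanP q t []) =
      (pvScanP q cur []).dropLast ++ pvScanP (fun c => p c || q c) cs ((pvScanP q cur []).getLastD []) := by
  induction cs with
  | nil =>
    intro cur
    have hne := pvScanP_ne_nil q cur []
    simp only [pvScanP, List.flatMap_cons, List.flatMap_nil, List.append_nil, List.getLastD_eq_getLast?]
    exact (pvDropLast_getLastD _ [] hne).symm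
  | cons c rest ih =>
    intro cur
    have hne := pvScanP_ne_nil q cur []
    by_cases hp : p c = true
    · simp only [pvScanP, hp, if_true, Bool.true_or, List.flatMap_cons]
      rw [ih []]
      simp only [List.getLastD_eq_getLast?]
      exact (pvDropLast_getLastD_append _ [] _ hne).symm
    · have hp' : p c = false := by simpa using hp
      by_cases hq : q c = true
      · simp only [pvScanP, hp', Bool.false_eq_true, if_false, hq, Bool.or_true]
        rw [ih (cur ++ [c])]
        have h1 : pvScanP q (cur ++ [c]) [] = pvScanP q cur [] ++ [[]] := by
          simpa [pvScanP] using pvScanP_append_sep q c hq cur [] []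
        simp only [h1, List.dropLast_concat, List.getLastD_eq_getLast?, List.getLast?_append,
          List.getLast?_singleton]
        exact (pvDropLast_getLastD_append _ [] _ hne).symm
      · have hq' : q c = false := by simpa using hq
        simp only [pvScanP, hp', hq', Bool.false_eq_true, if_false, Bool.or_self]
        rw [ih (cur ++ [c])]
        rw [pvScanP_snoc_nonsep q c hq' cur []]
        simp only [List.dropLast_concat, List.getLastD_eq_getLast?, List.getLast?_append,
          List.getLast?_singleton, Option.some_or, Option.getD_some]

theorem pvScanP_merge_nil (p q : Char → Bool) (cs : List Char) :
    (pvScanP p cs []).flatMap (fun t => pvScanP q t []) = pvScanP (fun c => p c || q c) cs [] := by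
  simpa [pvScanP] using pvScanP_merge p q cs []

theorem pvCascade (S : List Char) : ∀ (parts : List (List Char)),
    S.foldl (fun parts sep => parts.foldl (fun np p => np ++ PySem.Chars.splitOn p [sep]) []) parts
      = parts.flatMap (fun p => pvScanP (fun c => S.contains c) p []) := by
  induction S with
  | nil =>
    intro parts
    simp only [List.foldl_nil]
    have h : (fun (pp : List Char) => pvScanP (fun c => List.contains ([] : List Char) c) pp [])
        = fun pp => [pp] := funext fun pp => pvScanP_nosep _ pp [] (by simp)
    rw [h]
    simp
  | cons s S' ih =>
    intro parts
    simp only [List.foldl_cons]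
    rw [PySem.List.foldl_append_eq_flatMap, List.nil_append, ih]
    rw [List.flatMap_assoc]
    congr 1
    funext pp
    have h1 : PySem.Chars.splitOn pp [s] = pvScanP (fun c => c == s) pp [] := pvSplitOn_single s pp
    rw [h1, pvScanP_merge_nil]
    have h2 : (fun c => (c == s) || S'.contains c) = fun c => List.contains (s :: S') c := by
      funext c; simp [beq_eq_decide]
    rw [h2]


theorem pvFoldlIf_eq_filterMap (l : List (List Char)) : ∀ (acc : List String),
    l.foldl (fun out tok =>
      if 2 < (PySem.Chars.strip tok).length then out ++ [String.ofList (PySem.Chars.strip tok)] else out) acc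
    = acc ++ l.filterMap (fun p =>
        if 2 < (PySem.Chars.strip p).length then some (String.ofList (PySem.Chars.strip p)) else none) := by
  induction l with
  | nil => intro acc; simp
  | cons t rest ih =>
    intro acc
    simp only [List.foldl_cons, List.filterMap_cons]
    split <;> simp [ih]

theorem pvKeywords_eq (t : String) : pvKeywordsA t = pvKeywordsB t := by
  simp only [pvKeywordsA, pvKeywordsB]
  rw [pvCascade, pvScan_eq_scanP, pvFoldlIf_eq_filterMap]
  simp [pvSeps]

theorem pvInsertBy_skip {α : Type} (before : α → α → Bool) (x : α) (P Q : List α)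
    (h : ∀ a ∈ P, before x a = false) :
    PySem.List.insertBy before x (P ++ Q) = P ++ PySem.List.insertBy before x Q := by
  induction P with
  | nil => simp
  | cons a P' ih =>
    simp only [List.cons_append, PySem.List.insertBy, h a (by simp)]
    simp [ih (fun b hb => h b (by simp [hb]))]

theorem pvInsertBy_front {α : Type} (before : α → α → Bool) (x : α) (Q : List α)
    (h : ∀ b ∈ Q, before x b = true) :
    PySem.List.insertBy before x Q = x :: Q := by
  cases Q with
  | nil => rfl
  | cons b Q' => simp [PySem.List.insertBy, h b (by simp)]

theorem pvSorted_split {α : Type} (k : α → Int) (L : Int) (es : List α) (h : ∀ e ∈ es, k e ≤ L) :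
    PySem.List.sorted es (fun e => -(k e)) false
      = es.filter (fun e => k e == L)
        ++ PySem.List.sorted (es.filter (fun e => !(k e == L))) (fun e => -(k e)) false := by
  induction es using List.reverseRecOn with
  | nil => rfl
  | append_singleton es x ih =>
    have hx : k x ≤ L := h x (by simp)
    have hes : ∀ e ∈ es, k e ≤ L := fun e he => h e (by simp [he])
    rw [PySem.List.sorted_eq_foldl_insertBy, List.foldl_append, List.foldl_cons, List.foldl_nil,
      ← PySem.List.sorted_eq_foldl_insertBy, ih hes]
    by_cases hL : k x = L
    · have hfT : (k x == L) = true := by simp [hL]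
      rw [List.filter_append, List.filter_append]
      simp only [List.filter_cons, List.filter_nil, hfT, Bool.not_true, Bool.false_eq_true,
        if_true, if_false, List.append_nil]
      rw [pvInsertBy_skip _ x _ _ (fun a ha => by
        have : k a = L := by simpa using (List.mem_filter.mp ha).2
        simp [this, hL])]
      rw [pvInsertBy_front _ x _ (fun b hb => by
        have hb' := (PySem.List.mem_sorted _ _ _ b).mp hb
        have h1 : k b ≤ L := hes b (List.mem_of_mem_filter hb')
        have h2 : ¬(k b = L) := by simpa using (List.mem_filter.mp hb').2
        simp only [decide_eq_true_eq]
        omega)]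
      simp
    · have hfF : (k x == L) = false := by simp [hL]
      rw [List.filter_append, List.filter_append]
      simp only [List.filter_cons, List.filter_nil, hfF, Bool.not_false, Bool.false_eq_true,
        if_true, if_false, List.append_nil]
      conv_rhs => rw [PySem.List.sorted_eq_foldl_insertBy, List.foldl_append, List.foldl_cons,
        List.foldl_nil, ← PySem.List.sorted_eq_foldl_insertBy]
      rw [pvInsertBy_skip _ x _ _ (fun a ha => by
        have : k a = L := by simpa using (List.mem_filter.mp ha).2
        simp only [decide_eq_false_iff_not]
        omega)]

theorem pvFlatMap_congr {α β : Type} (l : List α) (f g : α → List β) (h : ∀ a ∈ l, f a = g a) :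
    l.flatMap f = l.flatMap g := by
  induction l with
  | nil => rfl
  | cons a rest ih =>
    simp only [List.flatMap_cons, h a (by simp), ih (fun b hb => h b (by simp [hb]))]

theorem pvSorted_buckets {α : Type} (k : α → Int) : ∀ (ks : List Int) (es : List α),
    ks.Pairwise (· > ·) → (∀ e ∈ es, k e ∈ ks) →
    PySem.List.sorted es (fun e => -(k e)) false
      = ks.flatMap (fun L => es.filter (fun e => k e == L)) := by
  intro ks
  induction ks with
  | nil =>
    intro es _ h
    cases es with
    | nil => rfl
    | cons e es' => exact absurd (h e (by simp)) (by simp)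
  | cons L ks' ih =>
    intro es hpw h
    have hhead : ∀ b ∈ ks', L > b := fun b hb => (List.pairwise_cons.mp hpw).1 b hb
    have hle : ∀ e ∈ es, k e ≤ L := by
      intro e he
      rcases List.mem_cons.mp (h e he) with h1 | h2
      · omega
      · exact le_of_lt (hhead _ h2)
    rw [pvSorted_split k L es hle, List.flatMap_cons]
    congr 1
    rw [ih (es.filter (fun e => !(k e == L))) (List.pairwise_cons.mp hpw).2 (fun e he => by
      have h1 := List.mem_of_mem_filter he
      have h2 : ¬(k e = L) := by simpa using (List.mem_filter.mp he).2
      rcases List.mem_cons.mp (h e h1) with h3 | h4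
      · omega
      · exact h4)]
    refine pvFlatMap_congr _ _ _ (fun L' hL' => ?_)
    have hne : L' ≠ L := by have := hhead L' hL'; omega
    rw [List.filter_filter]
    refine List.filter_congr (fun e _ => ?_)
    by_cases hk : k e = L'
    · simp [hk, hne]
    · simp [hk]


theorem pvFoldl_modify_eq_pairs (es : List (String × String × String × String))
    (d : PySem.Dict Int (List (String × String × String × String))) :
    es.foldl (fun d e => d.modify (PySem.Str.len e.1) [] (· ++ [e])) d
      = (es.map (fun e => (PySem.Str.len e.1, e))).foldl
          (fun d p => d.modify p.1 [] (· ++ [p.2])) d := by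
  induction es generalizing d with
  | nil => rfl
  | cons e rest ih => simp only [List.foldl_cons, List.map_cons]; exact ih _

theorem pvBuckets_getD (es : List (String × String × String × String)) (c : Int) :
    (es.foldl (fun d e => d.modify (PySem.Str.len e.1)
        ([] : List (String × String × String × String)) (· ++ [e])) PySem.Dict.empty).getD c []
      = es.filter (fun e => PySem.Str.len e.1 == c) := by
  rw [pvFoldl_modify_eq_pairs, PySem.Dict.getD_foldl_modify_append]
  simp [List.filter_map, List.map_map, Function.comp_def]

set_option maxHeartbeats 1000000 in
theorem pvBuckets_keys (es : List (String × String × String × String)) :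
    (es.foldl (fun d e => d.modify (PySem.Str.len e.1)
        ([] : List (String × String × String × String)) (· ++ [e])) PySem.Dict.empty).keys
      = PySem.Set.ofList (es.map (fun e => PySem.Str.len e.1)) := by
  rw [pvFoldl_modify_eq_pairs,
    PySem.Dict.keys_foldl_modify_key (es.map (fun e => (PySem.Str.len e.1, e)))
      (fun p => p.1) [] (fun _ p => (· ++ [p.2])) PySem.Dict.empty,
    PySem.Dict.keys_empty, PySem.Set.update_nil_left]
  simp [List.map_map, Function.comp_def]

set_option maxHeartbeats 1000000 in
theorem pvBucket_main (es : List (String × String × String × String)) :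
    PySem.List.sorted es (fun e => -(PySem.Str.len e.1)) false
      = (PySem.List.sorted ((es.foldl (fun d e => d.modify (PySem.Str.len e.1)
            ([] : List (String × String × String × String)) (· ++ [e])) PySem.Dict.empty).keys)
          (fun L => L) true).foldl
          (fun out L => out ++ (es.foldl (fun d e => d.modify (PySem.Str.len e.1)
            ([] : List (String × String × String × String)) (· ++ [e])) PySem.Dict.empty).getD L []) [] := by
  rw [PySem.List.foldl_append_eq_flatMap, List.nil_append, pvBuckets_keys]
  rw [pvFlatMap_congr _ _ _ (fun L _ => pvBuckets_getD es L)]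
  have hperm := PySem.List.sorted_perm (PySem.Set.ofList (es.map (fun e => PySem.Str.len e.1)))
      (fun L => L) true
  have hnd : (PySem.List.sorted (PySem.Set.ofList (es.map (fun e => PySem.Str.len e.1)))
      (fun L => L) true).Nodup :=
    hperm.symm.nodup (PySem.Set.nodup_ofList _)
  have hpw : (PySem.List.sorted (PySem.Set.ofList (es.map (fun e => PySem.Str.len e.1)))
      (fun L => L) true).Pairwise (· > ·) := by
    have h1 := PySem.List.sorted_pairwise_rev (PySem.Set.ofList (es.map (fun e => PySem.Str.len e.1)))
      (fun L => L)
    exact List.Pairwise.imp₂ (fun a b hle hne => lt_of_le_of_ne hle (Ne.symm hne)) h1 hnd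
  exact pvSorted_buckets _ _ es hpw (fun e he => by
    rw [PySem.List.mem_sorted, PySem.Set.mem_ofList]
    exact List.mem_map_of_mem he)

-- ===== VERDICT (by name: the statement is the Claim_ definition above) =====
set_option maxHeartbeats 1000000 in
theorem build_keyword_index_py_spec : Claim_equal_build_keyword_index_py := by
  intro taxonomy _
  unfold Spec_build_keyword_index_py
  simp only [build_keyword_index_py, build_keyword_index_py_alt,
    PySem.List.foldl_append_singleton_eq_map, pvKeywords_eq]
  exact pvBucket_main _
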